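-- pv_equiv track=rewrite | github.com/R3dPnd/pnd-leet-code | 0202/solution.py | digit_square_sum
-- ===== SOURCE A (Python) =====
-- def digit_square_sum(n:int):
--     digits = []
--     curr = n
--     while curr > 0:
--         digit = curr % 10
--         digits.append(digit)
--         curr = curr//10
--
--     sum = 0
--     for i in range(len(digits)):
--         digit = digits[len(digits)-i-1]
--         sum+= pow(digit, 2)
--     return sum
-- ===== SOURCE B (Python) =====
-- def digit_square_sum(n: int):
--     # Direct recursion: peel the last digit, square it, recurse on the rest.
--     if n <= 0:
--         return 0
--     d = n % 10
--     return d * d + digit_square_sum(n // 10)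
-- ===== Notes on version B (the rewrite author's own statement) =====
-- stated objective: simpler
-- what changed: Replaced A's two-pass structure (build a digit list arithmetically, then re-scan it back-to-front by index) with a single direct recursion that squares and adds each digit as it is peeled off, keeping no list at all.
import Mathlib
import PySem

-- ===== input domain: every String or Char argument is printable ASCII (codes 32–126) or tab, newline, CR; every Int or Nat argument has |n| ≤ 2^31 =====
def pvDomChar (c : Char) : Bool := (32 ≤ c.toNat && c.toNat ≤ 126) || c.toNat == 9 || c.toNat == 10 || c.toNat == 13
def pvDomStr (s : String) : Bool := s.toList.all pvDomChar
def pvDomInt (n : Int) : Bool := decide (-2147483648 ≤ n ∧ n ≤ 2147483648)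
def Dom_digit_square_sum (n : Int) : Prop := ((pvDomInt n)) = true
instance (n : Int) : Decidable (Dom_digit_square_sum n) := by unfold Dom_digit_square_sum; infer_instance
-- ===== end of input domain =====

-- B replaces A's two passes (build a digit list arithmetically, then re-scan it back-to-front
-- by index) with one direct recursion that squares each digit as it is peeled off; objective: simpler.

-- termination measure for the digit loops (cited by both ports' decreasing_by)
theorem pv_div10_lt (c : Int) (h : 0 < c) : (PySem.Int.floordiv c 10).toNat < c.toNat := by
  have : PySem.Int.floordiv c 10 = Int.fdiv c 10 := rfl
  rw [this, Int.fdiv_eq_ediv_of_nonneg _ (by norm_num)]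
  omega

-- ===== PORT A =====
-- while curr > 0: digits.append(curr % 10); curr = curr // 10
def pvBuildDigits (curr : Int) (digits : List Int) : List Int :=
  if h : 0 < curr then
    pvBuildDigits (PySem.Int.floordiv curr 10) (digits ++ [PySem.Int.mod curr 10])
  else digits
termination_by curr.toNat
decreasing_by exact pv_div10_lt curr h

def digit_square_sum (n : Int) : Int :=
  let digits := pvBuildDigits n []
  -- for i in range(len(digits)): sum += pow(digits[len(digits)-i-1], 2)
  -- (the index is always in range, so pyGetD's default 0 is never used)
  (PySem.List.pyRange 0 (PySem.List.len digits) 1).foldl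
    (fun sum i => sum + (PySem.List.pyGetD digits (PySem.List.len digits - i - 1) 0) ^ 2) 0

-- ===== PORT B =====
def digit_square_sum_alt (n : Int) : Int :=
  if h : n ≤ 0 then 0
  else
    let d := PySem.Int.mod n 10
    d * d + digit_square_sum_alt (PySem.Int.floordiv n 10)
termination_by n.toNat
decreasing_by exact pv_div10_lt n (by omega)

-- ===== PRECONDITION & SPEC =====
def Spec_digit_square_sum (n : Int) (out : Int) : Prop := out = digit_square_sum_alt n
instance (n : Int) (out : Int) : Decidable (Spec_digit_square_sum n out) := by unfold Spec_digit_square_sum; infer_instance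

-- ===== CLAIM (what is proved, stated in full; the proofs are below) =====
def Claim_equal_digit_square_sum : Prop := ∀ (n : Int), Dom_digit_square_sum n → Spec_digit_square_sum n (digit_square_sum n)

-- ===== LEMMAS AND PROOFS =====

-- sum of squares of a list, the common value both sides compute
def pvSq (xs : List Int) : Int := (xs.map (fun d => d ^ 2)).sum

theorem pv_map_sum (g : Int → Int) (xs : List Int) :
    (xs.map g).sum = ∑ j ∈ Finset.range xs.length, g (xs.getD j 0) := by
  induction xs using List.reverseRecOn with
  | nil => simp
  | append_singleton ys y ih =>
      rw [List.map_append, List.sum_append, ih]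
      simp only [List.length_append, List.length_singleton, Finset.sum_range_succ]
      congr 1
      · exact Finset.sum_congr rfl fun j hj => by
          simp at hj; rw [List.getD_append _ _ _ _ (by omega)]
      · simp [List.getD]

-- A's reverse-indexed second loop sums the squares of all list elements
theorem pv_loop_eq_sq (xs : List Int) :
    (PySem.List.pyRange 0 (PySem.List.len xs) 1).foldl
      (fun sum i => sum + (PySem.List.pyGetD xs (PySem.List.len xs - i - 1) 0) ^ 2) 0 = pvSq xs := by
  rw [PySem.List.pyRange_one, List.foldl_map,
    show PySem.List.len xs = (xs.length : Int) from PySem.List.len_eq xs,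
    show ((xs.length : Int) - 0).toNat = xs.length by omega]
  rw [PySem.List.foldl_congr_mem (List.range xs.length) _
      (fun s k => s + (xs.getD (xs.length - 1 - k) 0) ^ 2) 0
    (by intro acc k hk
        simp only [List.mem_range] at hk
        rw [show ((xs.length : Int) - (0 + ↑k) - 1) = ((xs.length - 1 - k : Nat) : Int) by omega,
          PySem.List.pyGetD_natCast])]
  rw [PySem.List.foldl_add, zero_add,
    show ((List.range xs.length).map fun k => xs.getD (xs.length - 1 - k) 0 ^ 2).sum
       = ∑ j ∈ Finset.range xs.length, (fun j => xs.getD j 0 ^ 2) (xs.length - 1 - j) from rfl,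
    Finset.sum_range_reflect (fun j => xs.getD j 0 ^ 2) xs.length]
  rw [pvSq, pv_map_sum (fun d => d ^ 2) xs]

-- A's first loop accumulates exactly B's recursion
theorem pv_build_sq (curr : Int) (acc : List Int) :
    pvSq (pvBuildDigits curr acc) = pvSq acc + digit_square_sum_alt curr := by
  rw [pvBuildDigits, digit_square_sum_alt]
  by_cases h : 0 < curr
  · rw [dif_pos h, dif_neg (by omega : ¬ curr ≤ 0)]
    rw [pv_build_sq (PySem.Int.floordiv curr 10) (acc ++ [PySem.Int.mod curr 10])]
    simp [pvSq]
    ring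
  · rw [dif_neg h, dif_pos (by omega : curr ≤ 0)]
    ring
termination_by curr.toNat
decreasing_by exact pv_div10_lt curr h

-- ===== VERDICT (by name: the statement is the Claim_ definition above) =====
theorem digit_square_sum_spec : Claim_equal_digit_square_sum := by
  intro n _
  unfold Spec_digit_square_sum digit_square_sum
  simp only [pv_loop_eq_sq, pv_build_sq]
  simp [pvSq]
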